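-- pv_equiv track=rewrite | github.com/keithwissing/adventofcode | 2025/day06.py | part1
-- ===== SOURCE A (Python) =====
-- import operator
-- from functools import reduce
--
-- def part1(lines):
--     """
--     >>> part1(t1)
--     4277556
--     """
--     rows = [x.split() for x in lines]
--     total = 0
--     for x in range(len(rows[0])):
--         if rows[-1][x] == '+':
--             val = sum(int(r[x]) for r in rows[:-1])
--         if rows[-1][x] == '*':
--             val = reduce(operator.mul, (int(r[x]) for r in rows[:-1]), 1)
--         total += val
--     return total
-- ===== SOURCE B (Python) =====
-- def part1(lines):
--     rows = [line.split() for line in lines]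
--     n = len(rows[0])
--     sums = [0] * n
--     prods = [1] * n
--     for row in rows[:-1]:
--         vals = [int(row[i]) for i in range(n)]
--         sums = [s + v for s, v in zip(sums, vals)]
--         prods = [p * v for p, v in zip(prods, vals)]
--     return sum({'+': s, '*': p}[op] for op, s, p in zip(rows[-1], sums, prods))
-- ===== Notes on version B (the rewrite author's own statement) =====
-- stated objective: alternative
-- what changed: B replaces A's per-column rescans of all rows (recomputing sum or product over rows[:-1] for every column index) by a single row-wise pass that maintains running per-column sums and products simultaneously, then combines them with the operator row via a dict dispatch.
-- outside the precondition, e.g. on part1(['1 2', '3 4', '+ x']): A returns 8, B raises KeyError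
import Mathlib
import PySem

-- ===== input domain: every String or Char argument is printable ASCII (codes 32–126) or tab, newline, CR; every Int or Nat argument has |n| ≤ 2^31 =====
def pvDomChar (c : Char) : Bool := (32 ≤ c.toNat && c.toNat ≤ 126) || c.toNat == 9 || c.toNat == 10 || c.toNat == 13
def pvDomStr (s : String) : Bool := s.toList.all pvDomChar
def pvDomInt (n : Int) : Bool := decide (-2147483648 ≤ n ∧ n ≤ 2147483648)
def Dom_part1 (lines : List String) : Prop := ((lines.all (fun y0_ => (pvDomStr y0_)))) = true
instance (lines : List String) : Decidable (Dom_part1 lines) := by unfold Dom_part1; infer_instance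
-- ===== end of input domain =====

-- B replaces A's per-column rescans of all rows by one row-wise pass keeping running
-- per-column sums and products, combined with the operator row at the end (alternative
-- decomposition, same asymptotic cost).

-- ===== PORT A =====
def part1 (lines : List String) : Int :=
  let rows := lines.map PySem.Str.split₀
  ((PySem.List.pyRange 0 ((PySem.List.pyGetD rows 0 []).length : Int) 1).foldl
    (fun (st : Int × Int) x =>
      let val1 := if PySem.List.pyGetD (PySem.List.pyGetD rows (-1) []) x "" = "+"
        then (PySem.List.slice rows none (some (-1))).foldl
          (fun a r => a + (PySem.Int.ofStr? (PySem.List.pyGetD r x "")).getD 0) 0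
        else st.2
      let val2 := if PySem.List.pyGetD (PySem.List.pyGetD rows (-1) []) x "" = "*"
        then (PySem.List.slice rows none (some (-1))).foldl
          (fun a r => a * (PySem.Int.ofStr? (PySem.List.pyGetD r x "")).getD 0) 1
        else val1
      (st.1 + val2, val2))
    (0, 0)).1

-- ===== PORT B =====
def part1_alt (lines : List String) : Int :=
  let rows := lines.map PySem.Str.split₀
  let n := (PySem.List.pyGetD rows 0 []).length
  let sp := (PySem.List.slice rows none (some (-1))).foldl
    (fun (sp : List Int × List Int) row =>
      let vals := (PySem.List.pyRange 0 (n : Int) 1).map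
        (fun i => (PySem.Int.ofStr? (PySem.List.pyGetD row i "")).getD 0)
      (List.zipWith (fun s v => s + v) sp.1 vals,
       List.zipWith (fun p v => p * v) sp.2 vals))
    (List.replicate n 0, List.replicate n 1)
  ((PySem.List.pyGetD rows (-1) []).zip (sp.1.zip sp.2)).foldl
    (fun acc t =>
      acc + ((PySem.Dict.ofList [("+", t.2.1), ("*", t.2.2)]).get? t.1).getD 0) 0

-- ===== PRECONDITION & SPEC =====
-- Pre_ excludes: empty input, grids whose operator row is shorter than the first row or
-- whose data rows are shorter or hold non-integer cells in the first row's columns (A raises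
-- IndexError/ValueError/NameError there), and operator tokens other than '+'/'*' in those
-- columns, on which A raises NameError at column 0 or reuses the previous column's value
-- while B's dict dispatch raises KeyError.
def Pre_part1 (lines : List String) : Prop :=
  lines ≠ [] ∧
  ((lines.map PySem.Str.split₀).getD 0 []).length
    ≤ ((lines.map PySem.Str.split₀).getLastD []).length ∧
  (∀ k < ((lines.map PySem.Str.split₀).getD 0 []).length,
     ((lines.map PySem.Str.split₀).getLastD []).getD k "" = "+" ∨
     ((lines.map PySem.Str.split₀).getLastD []).getD k "" = "*") ∧
  (∀ r ∈ (lines.map PySem.Str.split₀).dropLast,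
     ((lines.map PySem.Str.split₀).getD 0 []).length ≤ r.length ∧
     ∀ i < ((lines.map PySem.Str.split₀).getD 0 []).length,
       (PySem.Int.ofStr? (r.getD i "")).isSome = true)
instance (lines : List String) : Decidable (Pre_part1 lines) := by
  unfold Pre_part1; infer_instance

def pvWitness_part1 : List String := ["1 2", "3 4", "+ *"]

def Spec_part1 (lines : List String) (out : Int) : Prop := out = part1_alt lines
instance (lines : List String) (out : Int) : Decidable (Spec_part1 lines out) := by
  unfold Spec_part1; infer_instance

-- ===== CLAIM (what is proved, stated in full; the proofs are below) =====
def Claim_equal_part1 : Prop :=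
  ∀ (lines : List String), Dom_part1 lines → Pre_part1 lines → Spec_part1 lines (part1 lines)

-- ===== LEMMAS AND PROOFS =====

-- int(r[x]) as both ports compute it
def pvTok (r : List String) (x : Int) : Int :=
  (PySem.Int.ofStr? (PySem.List.pyGetD r x "")).getD 0

-- A's loop: every iteration that takes a '+'/'*' branch overwrites val, so the fold tracks
-- (running total, last column value).
theorem pv_foldl_track {α : Type} (l : List α) (step : Int × Int → α → Int × Int)
    (c : α → Int) (h : ∀ x ∈ l, ∀ st : Int × Int, step st x = (st.1 + c x, c x)) :
    ∀ t v : Int, (l.foldl step (t, v)).1 = t + (l.map c).sum := by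
  induction l with
  | nil => intro t v; simp
  | cons a l ih =>
    intro t v
    have ha := h a (by simp)
    rw [List.foldl_cons, ha (t, v)]
    rw [ih (fun x hx => h x (by simp [hx])) (t + c a) (c a)]
    simp [add_assoc]

-- B's row pass: starting from per-column values f/g over range n, folding the data rows
-- yields the per-column fold of each column.
theorem pv_rows_fold (n : Nat) (rs : List (List String)) :
    ∀ f g : Nat → Int,
    rs.foldl (fun (sp : List Int × List Int) row =>
        (List.zipWith (fun s v => s + v) sp.1 ((PySem.List.pyRange 0 (n : Int) 1).map
           (fun i => (PySem.Int.ofStr? (PySem.List.pyGetD row i "")).getD 0)),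
         List.zipWith (fun p v => p * v) sp.2 ((PySem.List.pyRange 0 (n : Int) 1).map
           (fun i => (PySem.Int.ofStr? (PySem.List.pyGetD row i "")).getD 0))))
      ((List.range n).map f, (List.range n).map g)
    = ((List.range n).map (fun (k : Nat) => rs.foldl (fun a r => a + pvTok r (k : Int)) (f k)),
       (List.range n).map (fun (k : Nat) => rs.foldl (fun a r => a * pvTok r (k : Int)) (g k))) := by
  induction rs with
  | nil => intro f g; rfl
  | cons r rs ih =>
    intro f g
    rw [List.foldl_cons]
    have hvals : (PySem.List.pyRange 0 (n : Int) 1).map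
        (fun i => (PySem.Int.ofStr? (PySem.List.pyGetD r i "")).getD 0)
        = (List.range n).map (fun (k : Nat) => pvTok r (k : Int)) := by
      rw [PySem.List.pyRange_zero_nat, List.map_map]; simp [pvTok, Function.comp]
    simp only [hvals, List.zipWith_map, List.zipWith_self]
    rw [ih (fun (k : Nat) => f k + pvTok r (k : Int)) (fun (k : Nat) => g k * pvTok r (k : Int))]
    simp [List.foldl_cons]

-- dict lookup {'+': s, '*': p}[op] at the two admitted keys
theorem pv_dict_plus (s p : Int) :
    ((PySem.Dict.ofList [("+", s), ("*", p)]).get? "+").getD 0 = s := by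
  simp [PySem.Dict.ofList, PySem.Dict.update, PySem.Dict.insert, PySem.Dict.get?,
    PySem.Dict.empty, PySem.Dict.contains]

theorem pv_dict_star (s p : Int) :
    ((PySem.Dict.ofList [("+", s), ("*", p)]).get? "*").getD 0 = p := by
  simp [PySem.Dict.ofList, PySem.Dict.update, PySem.Dict.insert, PySem.Dict.get?,
    PySem.Dict.empty, PySem.Dict.contains]

-- the column value both programs assign to column x
def pvCol (rows : List (List String)) (x : Int) : Int :=
  if PySem.List.pyGetD (rows.getLastD []) x "" = "+"
  then (PySem.List.slice rows none (some (-1))).foldl (fun a r => a + pvTok r x) 0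
  else (PySem.List.slice rows none (some (-1))).foldl (fun a r => a * pvTok r x) 1

-- zip truncates to its shorter argument
theorem pv_zip_trunc {α β : Type} (l : List α) (m : List β) :
    l.zip m = (l.take m.length).zip m := by
  induction l generalizing m with
  | nil => simp
  | cons a l ih =>
    cases m with
    | nil => simp
    | cons b m => simp [List.zip_cons_cons, ih]

theorem pv_take_eq_map_range {α : Type} (l : List α) (n : Nat) (d : α) (h : n ≤ l.length) :
    l.take n = (List.range n).map (fun k => l.getD k d) := by
  apply List.ext_getElem
  · simp [h]
  · intro i h1 h2
    simp only [List.length_take] at h1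
    rw [List.getElem_take]
    simp [List.getD_eq_getElem?_getD, List.getElem?_eq_getElem (by omega : i < l.length)]

-- both ports, with rows abstracted, compute the sum of the column values
theorem pv_main (rows : List (List String)) (hrne : rows ≠ [])
    (hlen : (rows.getD 0 []).length ≤ (rows.getLastD []).length)
    (hops : ∀ k < (rows.getD 0 []).length,
      (rows.getLastD []).getD k "" = "+" ∨ (rows.getLastD []).getD k "" = "*") :
    ((PySem.List.pyRange 0 ((PySem.List.pyGetD rows 0 []).length : Int) 1).foldl
      (fun (st : Int × Int) x =>
        let val1 := if PySem.List.pyGetD (PySem.List.pyGetD rows (-1) []) x "" = "+"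
          then (PySem.List.slice rows none (some (-1))).foldl
            (fun a r => a + (PySem.Int.ofStr? (PySem.List.pyGetD r x "")).getD 0) 0
          else st.2
        let val2 := if PySem.List.pyGetD (PySem.List.pyGetD rows (-1) []) x "" = "*"
          then (PySem.List.slice rows none (some (-1))).foldl
            (fun a r => a * (PySem.Int.ofStr? (PySem.List.pyGetD r x "")).getD 0) 1
          else val1
        (st.1 + val2, val2))
      (0, 0)).1
    =
    (let n := (PySem.List.pyGetD rows 0 []).length
     let sp := (PySem.List.slice rows none (some (-1))).foldl
       (fun (sp : List Int × List Int) row =>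
         let vals := (PySem.List.pyRange 0 (n : Int) 1).map
           (fun i => (PySem.Int.ofStr? (PySem.List.pyGetD row i "")).getD 0)
         (List.zipWith (fun s v => s + v) sp.1 vals,
          List.zipWith (fun p v => p * v) sp.2 vals))
       (List.replicate n 0, List.replicate n 1)
     ((PySem.List.pyGetD rows (-1) []).zip (sp.1.zip sp.2)).foldl
       (fun acc t =>
         acc + ((PySem.Dict.ofList [("+", t.2.1), ("*", t.2.2)]).get? t.1).getD 0) 0) := by
  have hgetlast : PySem.List.pyGetD rows (-1) ([] : List String) = rows.getLastD [] := by
    rw [PySem.List.pyGetD_neg_one rows [] hrne]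
    cases rows with
    | nil => simp at hrne
    | cons a l => simp [List.getLastD_eq_getLast?, List.getLast?_eq_some_getLast]
  have hget0 : PySem.List.pyGetD rows 0 ([] : List String) = rows.getD 0 [] :=
    PySem.List.pyGetD_zero rows []
  simp only [hgetlast, hget0]
  have hstep : ∀ x ∈ PySem.List.pyRange 0 ((rows.getD 0 []).length : Int) 1,
      ∀ st : Int × Int,
      (fun (st : Int × Int) x =>
        let val1 := if PySem.List.pyGetD (rows.getLastD []) x "" = "+"
          then (PySem.List.slice rows none (some (-1))).foldl
            (fun a r => a + (PySem.Int.ofStr? (PySem.List.pyGetD r x "")).getD 0) 0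
          else st.2
        let val2 := if PySem.List.pyGetD (rows.getLastD []) x "" = "*"
          then (PySem.List.slice rows none (some (-1))).foldl
            (fun a r => a * (PySem.Int.ofStr? (PySem.List.pyGetD r x "")).getD 0) 1
          else val1
        (st.1 + val2, val2)) st x = (st.1 + pvCol rows x, pvCol rows x) := by
    intro x hx st
    rw [PySem.List.mem_pyRange_one] at hx
    obtain ⟨k, hxk, hk⟩ : ∃ k : Nat, x = (k : Int) ∧ k < (rows.getD 0 []).length :=
      ⟨x.toNat, by omega, by omega⟩
    have hop : PySem.List.pyGetD (rows.getLastD []) x "" = (rows.getLastD []).getD k "" := by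
      rw [hxk]; exact PySem.List.pyGetD_natCast _ _ _
    rcases hops k hk with h | h
    · simp only [pvCol, pvTok, hop, h]; simp
    · simp only [pvCol, pvTok, hop, h]; simp
  rw [pv_foldl_track _ _ (pvCol rows) hstep 0 0]
  conv_lhs => rw [PySem.List.pyRange_zero_nat, List.map_map]
  -- B side
  have hrepl0 : (List.replicate (rows.getD 0 []).length (0 : Int))
      = (List.range (rows.getD 0 []).length).map (fun _ => (0 : Int)) := by simp
  have hrepl1 : (List.replicate (rows.getD 0 []).length (1 : Int))
      = (List.range (rows.getD 0 []).length).map (fun _ => (1 : Int)) := by simp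
  rw [hrepl0, hrepl1,
    pv_rows_fold (rows.getD 0 []).length (PySem.List.slice rows none (some (-1)))
      (fun _ => 0) (fun _ => 1)]
  rw [List.zip_map']
  rw [pv_zip_trunc]
  simp only [List.length_map, List.length_range]
  rw [pv_take_eq_map_range (rows.getLastD []) (rows.getD 0 []).length "" hlen]
  rw [List.zip_map', List.foldl_map]
  rw [PySem.List.foldl_congr_mem _ _
    (fun acc (k : Nat) => acc + pvCol rows (k : Int)) 0 ?_]
  · rw [PySem.List.foldl_add]
    simp only [Function.comp_def, zero_add]
  · intro acc k hkmem
    have hk : k < (rows.getD 0 []).length := List.mem_range.mp hkmem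
    have hop : PySem.List.pyGetD (rows.getLastD []) (k : Int) ""
        = (rows.getLastD []).getD k "" := PySem.List.pyGetD_natCast _ _ _
    rcases hops k hk with h | h
    · simp only [h, pv_dict_plus, pvCol, pvTok, hop]; simp
    · simp only [h, pv_dict_star, pvCol, pvTok, hop]; simp

-- ===== VERDICT (by name: the statement is the Claim_ definition above) =====
theorem part1_spec : Claim_equal_part1 := by
  intro lines _hdom hpre
  obtain ⟨hne, hlen, hops, _hints⟩ := hpre
  have hrne : lines.map PySem.Str.split₀ ≠ [] := by simp [hne]
  exact pv_main (lines.map PySem.Str.split₀) hrne hlen hops
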